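-- pv_equiv track=rewrite | github.com/skiweg1985/a0-telegram-w-voice | helpers/handler.py | _pick_audio_attachment
-- ===== SOURCE A (Python) =====
-- def _pick_audio_attachment(attachments: list[str]) -> str | None:
--     if not attachments:
--         return None
--     prioritized = ["voice_", "audio_", "videonote_"]
--     low = [a.lower() for a in attachments]
--     for needle in prioritized:
--         for idx, item in enumerate(low):
--             if needle in item:
--                 return attachments[idx]
--
--     # fallback by extension
--     for path in attachments:
--         p = path.lower()
--         if p.endswith((".ogg", ".mp3", ".wav", ".m4a", ".mp4")):
--             return path
--     return attachments[0]
-- ===== SOURCE B (Python) =====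
-- def _rank(a):
--     p = a.lower()
--     if "voice_" in p:
--         return 0
--     if "audio_" in p:
--         return 1
--     if "videonote_" in p:
--         return 2
--     if p.endswith((".ogg", ".mp3", ".wav", ".m4a", ".mp4")):
--         return 3
--     return 4
--
--
-- def _pick_audio_attachment(attachments: list[str]) -> str | None:
--     if not attachments:
--         return None
--     return min(attachments, key=_rank)
-- ===== Notes on version B (the rewrite author's own statement) =====
-- stated objective: simpler
-- what changed: Replaces A's three sequential needle scans plus a separate extension scan and head fallback by a single pass: a rank function (0-2 for prefix needles, 3 for audio extensions, 4 otherwise) and min(attachments, key=rank), whose first-minimum tie-break reproduces A's selection exactly.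
import Mathlib
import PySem

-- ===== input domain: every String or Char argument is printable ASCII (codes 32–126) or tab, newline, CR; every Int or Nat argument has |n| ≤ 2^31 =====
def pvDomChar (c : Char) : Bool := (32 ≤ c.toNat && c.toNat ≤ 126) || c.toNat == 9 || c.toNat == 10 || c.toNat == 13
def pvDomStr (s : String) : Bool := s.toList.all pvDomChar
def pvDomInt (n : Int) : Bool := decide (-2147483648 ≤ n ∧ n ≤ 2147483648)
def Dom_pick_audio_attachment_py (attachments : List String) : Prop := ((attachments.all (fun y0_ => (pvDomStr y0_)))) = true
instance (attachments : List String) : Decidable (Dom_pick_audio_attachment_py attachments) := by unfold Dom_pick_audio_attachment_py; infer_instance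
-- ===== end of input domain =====

-- B replaces A's sequential priority-needle scans, extension scan and head fallback by one
-- rank function and a single first-minimum pass (simpler decomposition, same results).

-- ===== PORT A =====
-- inner loop: 'for idx, item in enumerate(low): if needle in item: return attachments[idx]'
def pvScanNeedle (needle : String) (low : List String) (idx : Nat) : Option Nat :=
  match low with
  | [] => none
  | item :: rest =>
    if PySem.Str.isIn needle item then some idx else pvScanNeedle needle rest (idx + 1)

-- outer loop: 'for needle in prioritized'
def pvPrioLoop (needles : List String) (low : List String) : Option Nat :=
  match needles with
  | [] => none
  | n :: rest =>
    match pvScanNeedle n low 0 with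
    | some i => some i
    | none => pvPrioLoop rest low

-- p.endswith((".ogg", ".mp3", ".wav", ".m4a", ".mp4"))
def pvExtA (p : String) : Bool :=
  PySem.Str.endswith p ".ogg" || PySem.Str.endswith p ".mp3" || PySem.Str.endswith p ".wav" ||
    PySem.Str.endswith p ".m4a" || PySem.Str.endswith p ".mp4"

def pick_audio_attachment_py (attachments : List String) : Option String :=
  if attachments = [] then none
  else
    let low := attachments.map PySem.Str.lower
    match pvPrioLoop ["voice_", "audio_", "videonote_"] low with
    | some idx => PySem.List.pyGet? attachments (idx : Int)
    | none =>
      -- fallback by extension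
      match attachments.find? (fun path => pvExtA (PySem.Str.lower path)) with
      | some path => some path
      | none => PySem.List.pyGet? attachments 0

-- ===== PORT B =====
-- rank of the lowered string p = a.lower()
def pvRankLow (p : String) : Nat :=
  if PySem.Str.isIn "voice_" p then 0
  else if PySem.Str.isIn "audio_" p then 1
  else if PySem.Str.isIn "videonote_" p then 2
  else if PySem.Str.endswith p ".ogg" || PySem.Str.endswith p ".mp3" ||
          PySem.Str.endswith p ".wav" || PySem.Str.endswith p ".m4a" ||
          PySem.Str.endswith p ".mp4" then 3
  else 4

def pvRank (a : String) : Nat := pvRankLow (PySem.Str.lower a)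

def pick_audio_attachment_py_alt (attachments : List String) : Option String :=
  if attachments = [] then none
  else PySem.List.min? attachments pvRank

-- ===== PRECONDITION & SPEC =====
def Spec_pick_audio_attachment_py (attachments : List String) (out : Option String) : Prop := out = pick_audio_attachment_py_alt attachments
instance (attachments : List String) (out : Option String) : Decidable (Spec_pick_audio_attachment_py attachments out) := by unfold Spec_pick_audio_attachment_py; infer_instance

-- ===== CLAIM (what is proved, stated in full; the proofs are below) =====
def Claim_equal_pick_audio_attachment_py : Prop := ∀ (attachments : List String), Dom_pick_audio_attachment_py attachments → Spec_pick_audio_attachment_py attachments (pick_audio_attachment_py attachments)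

-- ===== LEMMAS AND PROOFS =====

-- minimum of the ranks of x :: t
def pvMinR (x : String) (t : List String) : Nat :=
  t.foldl (fun m a => min m (pvRank a)) (pvRank x)

theorem pvFoldlMin_swap (l : List String) (c d : Nat) :
    l.foldl (fun m a => min m (pvRank a)) (min c d) =
      min c (l.foldl (fun m a => min m (pvRank a)) d) := by
  induction l generalizing d with
  | nil => rfl
  | cons b l ih =>
    simp only [List.foldl_cons, min_assoc, ih]

theorem pvMinR_cons (x b : String) (t : List String) :
    pvMinR x (b :: t) = min (pvRank x) (pvMinR b t) := by
  simp only [pvMinR, List.foldl_cons, pvFoldlMin_swap]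

theorem pvMinR_le (x : String) (t : List String) :
    ∀ a ∈ x :: t, pvMinR x t ≤ pvRank a := by
  induction t generalizing x with
  | nil => intro a ha; simp at ha; simp [pvMinR, ha]
  | cons b t ih =>
    intro a ha
    rw [pvMinR_cons]
    rcases List.mem_cons.1 ha with h | h
    · subst h; exact min_le_left _ _
    · exact le_trans (min_le_right _ _) (ih b a h)

theorem pvMinR_attained (x : String) (t : List String) :
    ∃ a ∈ x :: t, pvRank a = pvMinR x t := by
  induction t generalizing x with
  | nil => exact ⟨x, by simp, rfl⟩
  | cons b t ih =>
    rw [pvMinR_cons]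
    rcases le_total (pvRank x) (pvMinR b t) with h | h
    · exact ⟨x, by simp, (min_eq_left h).symm⟩
    · obtain ⟨a, ha, hr⟩ := ih b
      exact ⟨a, List.mem_cons_of_mem x ha, by rw [hr, min_eq_right h]⟩

theorem pvRank_le_four (a : String) : pvRank a ≤ 4 := by
  unfold pvRank pvRankLow; split_ifs <;> omega

-- find? only looks at members
theorem pvFind?_congr_mem {α : Type} (p q : α → Bool) (l : List α)
    (h : ∀ a ∈ l, p a = q a) : l.find? p = l.find? q := by
  induction l with
  | nil => rfl
  | cons x t ih =>
    simp only [List.find?_cons]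
    rw [h x (by simp)]
    cases q x
    · exact ih (fun a ha => h a (by simp [ha]))
    · rfl

-- the inner enumerate scan is findIdx? on the lowered list
theorem pvScanNeedle_eq (needle : String) (low : List String) (k : Nat) :
    pvScanNeedle needle low k =
      (low.findIdx? (fun item => PySem.Str.isIn needle item)).map (· + k) := by
  induction low generalizing k with
  | nil => rfl
  | cons item rest ih =>
    simp only [pvScanNeedle, List.findIdx?_cons]
    cases h : PySem.Str.isIn needle item
    · rw [ih (k + 1)]
      cases List.findIdx? (fun item => PySem.Str.isIn needle item) rest <;>
        simp <;> omega
    · simp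

-- indexing at findIdx? is find?
theorem pvGet_findIdx (p : String → Bool) (xs : List String) (z : Option String) :
    (match xs.findIdx? p with
     | some i => PySem.List.pyGet? xs ((i : Nat) : Int)
     | none => z) =
    (match xs.find? p with
     | some a => some a
     | none => z) := by
  induction xs generalizing z with
  | nil => rfl
  | cons x t ih =>
    simp only [List.findIdx?_cons, List.find?_cons]
    cases h : p x
    · simp only [cond_false]
      cases ht : t.findIdx? p
      · simpa [ht] using ih z
      · rename_i i
        have := ih z
        simp only [ht] at this ⊢
        simpa [PySem.List.pyGet?_natCast] using this
    · simp [PySem.List.pyGet?_natCast]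

-- the left fold inside min? with a some accumulator
theorem pvMin?_cons (x : String) (t : List String) :
    PySem.List.min? (x :: t) pvRank =
      some (t.foldl (fun m a => if pvRank a < pvRank m then a else m) x) := by
  show List.foldl _ none (x :: t) = _
  rw [List.foldl_cons]
  induction t generalizing x with
  | nil => rfl
  | cons b t ih =>
    rw [List.foldl_cons, List.foldl_cons]
    show List.foldl _ (if pvRank b < pvRank x then some b else some x) t = _
    split_ifs with h <;> simpa [h] using ih _

-- the running first-minimum fold is find? of the first rank-minimal element
theorem pvFoldl_eq_find? (t : List String) (x : String) :
    ((x :: t).find? (fun a => pvRank a == pvMinR x t)) =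
      some (t.foldl (fun m a => if pvRank a < pvRank m then a else m) x) := by
  induction t generalizing x with
  | nil => simp [pvMinR]
  | cons b t ih =>
    have hmr : pvMinR x (b :: t) = min (pvRank x) (pvMinR b t) := pvMinR_cons x b t
    rw [List.foldl_cons]
    by_cases hb : pvRank b < pvRank x
    · -- accumulator becomes b
      have hy : (if pvRank b < pvRank x then b else x) = b := if_pos hb
      rw [hy]
      have hlt : pvMinR b t < pvRank x :=
        lt_of_le_of_lt (pvMinR_le b t b (by simp)) hb
      have hmr' : pvMinR x (b :: t) = pvMinR b t := by
        rw [hmr]; exact min_eq_right (le_of_lt hlt)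
      rw [hmr', List.find?_cons]
      have hx : (pvRank x == pvMinR b t) = false := by
        simp; omega
      rw [hx]
      exact ih b
    · have hy : (if pvRank b < pvRank x then b else x) = x := if_neg hb
      rw [hy]
      have hxb : pvRank x ≤ pvRank b := le_of_not_gt hb
      have hmr' : pvMinR x (b :: t) = pvMinR x t := by
        cases t with
        | nil => simp [pvMinR_cons, pvMinR, min_eq_left hxb]
        | cons c t' =>
          rw [hmr, pvMinR_cons, pvMinR_cons, ← min_assoc, min_eq_left hxb]
      rw [hmr', List.find?_cons, List.find?_cons]
      by_cases hx : pvRank x = pvMinR x t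
      · simp only [hx, beq_self_eq_true, cond_true]
        have := ih x
        rw [List.find?_cons] at this
        simp only [hx, beq_self_eq_true, cond_true] at this
        exact this
      · have hxf : (pvRank x == pvMinR x t) = false := by simp [hx]
        rw [hxf]
        have hlt : pvMinR x t < pvRank x :=
          lt_of_le_of_ne (by simpa [hmr'] using pvMinR_le x (b :: t) x (by simp)) (by omega)
        have hbf : (pvRank b == pvMinR x t) = false := by simp; omega
        rw [hbf]
        have := ih x
        rw [List.find?_cons] at this
        simp only [hxf, cond_false] at this
        exact this

-- rank case characterisations
theorem pvRank_eq_zero (a : String) :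
    (pvRank a = 0) ↔ PySem.Str.isIn "voice_" (PySem.Str.lower a) = true := by
  unfold pvRank pvRankLow; split_ifs <;> simp_all

theorem pvRank_eq_one (a : String) :
    (pvRank a = 1) ↔ (PySem.Str.isIn "voice_" (PySem.Str.lower a) = false ∧
      PySem.Str.isIn "audio_" (PySem.Str.lower a) = true) := by
  unfold pvRank pvRankLow; split_ifs <;> simp_all

theorem pvRank_eq_two (a : String) :
    (pvRank a = 2) ↔ (PySem.Str.isIn "voice_" (PySem.Str.lower a) = false ∧
      PySem.Str.isIn "audio_" (PySem.Str.lower a) = false ∧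
      PySem.Str.isIn "videonote_" (PySem.Str.lower a) = true) := by
  unfold pvRank pvRankLow; split_ifs <;> simp_all

theorem pvRank_eq_three (a : String) :
    (pvRank a = 3) ↔ (PySem.Str.isIn "voice_" (PySem.Str.lower a) = false ∧
      PySem.Str.isIn "audio_" (PySem.Str.lower a) = false ∧
      PySem.Str.isIn "videonote_" (PySem.Str.lower a) = false ∧
      pvExtA (PySem.Str.lower a) = true) := by
  unfold pvRank pvRankLow pvExtA; split_ifs <;> simp_all <;> intros <;> simp_all

theorem pvRank_eq_four (a : String) :
    (pvRank a = 4) ↔ (PySem.Str.isIn "voice_" (PySem.Str.lower a) = false ∧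
      PySem.Str.isIn "audio_" (PySem.Str.lower a) = false ∧
      PySem.Str.isIn "videonote_" (PySem.Str.lower a) = false ∧
      pvExtA (PySem.Str.lower a) = false) := by
  unfold pvRank pvRankLow pvExtA; split_ifs <;> simp_all <;> intros <;> simp_all

-- A's chain equals find? of the first rank-minimal element
theorem pvMatch_assoc (o r : Option Nat) (G : Nat → Option String) (E : Option String) :
    (match (match o with | some i => some i | none => r) with
     | some idx => G idx
     | none => E) =
    (match o with
     | some i => G i
     | none => match r with | some idx => G idx | none => E) := by
  cases o <;> rfl

theorem pvChain_eq (x : String) (t : List String) :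
    (match (x :: t).find? (fun a => PySem.Str.isIn "voice_" (PySem.Str.lower a)) with
     | some a => some a
     | none =>
       match (x :: t).find? (fun a => PySem.Str.isIn "audio_" (PySem.Str.lower a)) with
       | some a => some a
       | none =>
         match (x :: t).find? (fun a => PySem.Str.isIn "videonote_" (PySem.Str.lower a)) with
         | some a => some a
         | none =>
           match (x :: t).find? (fun a => pvExtA (PySem.Str.lower a)) with
           | some a => some a
           | none => some x) =
    ((x :: t).find? (fun a => pvRank a == pvMinR x t)) := by
  have hle := pvMinR_le x t
  obtain ⟨w, hw, hwr⟩ := pvMinR_attained x t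
  have h4 : pvMinR x t ≤ 4 := hwr ▸ pvRank_le_four w
  have hcase : pvMinR x t = 0 ∨ pvMinR x t = 1 ∨ pvMinR x t = 2 ∨ pvMinR x t = 3 ∨
      pvMinR x t = 4 := by omega
  rcases hcase with h | h | h | h | h <;> rw [h] at hwr ⊢
  · -- some attachment contains "voice_"
    have hcg : (x :: t).find? (fun a => pvRank a == 0) =
        (x :: t).find? (fun a => PySem.Str.isIn "voice_" (PySem.Str.lower a)) :=
      pvFind?_congr_mem _ _ _ (fun a _ => by
        cases hq : PySem.Str.isIn "voice_" (PySem.Str.lower a)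
        · have h2 : pvRank a ≠ 0 := fun hc => by
            have h3 := (pvRank_eq_zero a).mp hc; simp_all
          simp [h2, hq]
        · have h3 : pvRank a = 0 := (pvRank_eq_zero a).mpr (by simpa using hq)
          simp [h3, hq])
    rw [hcg]
    have hsome : ((x :: t).find? (fun a => PySem.Str.isIn "voice_" (PySem.Str.lower a))).isSome := by
      rw [List.find?_isSome]
      exact ⟨w, hw, (pvRank_eq_zero w).mp hwr⟩
    obtain ⟨a0, ha0⟩ := Option.isSome_iff_exists.mp hsome
    rw [ha0]
  · -- rank 1: no "voice_" anywhere, some "audio_"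
    have hno : ∀ a ∈ x :: t, PySem.Str.isIn "voice_" (PySem.Str.lower a) = false := by
      intro a ha
      cases hq : PySem.Str.isIn "voice_" (PySem.Str.lower a)
      · rfl
      · have := hle a ha; rw [h, (pvRank_eq_zero a).mpr hq] at this; omega
    have hn0 : (x :: t).find? (fun a => PySem.Str.isIn "voice_" (PySem.Str.lower a)) = none :=
      List.find?_eq_none.mpr (fun a ha => by simpa using hno a ha)
    rw [hn0]
    have hcg : (x :: t).find? (fun a => pvRank a == 1) =
        (x :: t).find? (fun a => PySem.Str.isIn "audio_" (PySem.Str.lower a)) :=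
      pvFind?_congr_mem _ _ _ (fun a ha => by
        cases hq : PySem.Str.isIn "audio_" (PySem.Str.lower a)
        · have h2 : pvRank a ≠ 1 := fun hc => by
            have h3 := ((pvRank_eq_one a).mp hc).2; simp_all
          simp [h2, hq]
        · have h3 : pvRank a = 1 := (pvRank_eq_one a).mpr ⟨hno a ha, by simpa using hq⟩
          simp [h3, hq])
    rw [hcg]
    have hsome : ((x :: t).find? (fun a => PySem.Str.isIn "audio_" (PySem.Str.lower a))).isSome := by
      rw [List.find?_isSome]
      exact ⟨w, hw, ((pvRank_eq_one w).mp hwr).2⟩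
    obtain ⟨a0, ha0⟩ := Option.isSome_iff_exists.mp hsome
    rw [ha0]
  · -- rank 2: no "voice_"/"audio_", some "videonote_"
    have hrge : ∀ a ∈ x :: t, 2 ≤ pvRank a := fun a ha => h ▸ hle a ha
    have hno0 : ∀ a ∈ x :: t, PySem.Str.isIn "voice_" (PySem.Str.lower a) = false := by
      intro a ha
      cases hq : PySem.Str.isIn "voice_" (PySem.Str.lower a)
      · rfl
      · have := hrge a ha; rw [(pvRank_eq_zero a).mpr hq] at this; omega
    have hno1 : ∀ a ∈ x :: t, PySem.Str.isIn "audio_" (PySem.Str.lower a) = false := by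
      intro a ha
      cases hq : PySem.Str.isIn "audio_" (PySem.Str.lower a)
      · rfl
      · have := hrge a ha
        rw [(pvRank_eq_one a).mpr ⟨hno0 a ha, hq⟩] at this; omega
    rw [List.find?_eq_none.mpr (fun a ha => by simpa using hno0 a ha),
        List.find?_eq_none.mpr (fun a ha => by simpa using hno1 a ha)]
    have hcg : (x :: t).find? (fun a => pvRank a == 2) =
        (x :: t).find? (fun a => PySem.Str.isIn "videonote_" (PySem.Str.lower a)) :=
      pvFind?_congr_mem _ _ _ (fun a ha => by
        cases hq : PySem.Str.isIn "videonote_" (PySem.Str.lower a)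
        · have h2 : pvRank a ≠ 2 := fun hc => by
            have h3 := ((pvRank_eq_two a).mp hc).2.2; simp_all
          simp [h2, hq]
        · have h3 : pvRank a = 2 := (pvRank_eq_two a).mpr ⟨hno0 a ha, hno1 a ha, by simpa using hq⟩
          simp [h3, hq])
    rw [hcg]
    have hsome : ((x :: t).find? (fun a => PySem.Str.isIn "videonote_" (PySem.Str.lower a))).isSome := by
      rw [List.find?_isSome]
      exact ⟨w, hw, ((pvRank_eq_two w).mp hwr).2.2⟩
    obtain ⟨a0, ha0⟩ := Option.isSome_iff_exists.mp hsome
    rw [ha0]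
  · -- rank 3: no needle anywhere, some audio extension
    have hrge : ∀ a ∈ x :: t, 3 ≤ pvRank a := fun a ha => h ▸ hle a ha
    have hno0 : ∀ a ∈ x :: t, PySem.Str.isIn "voice_" (PySem.Str.lower a) = false := by
      intro a ha
      cases hq : PySem.Str.isIn "voice_" (PySem.Str.lower a)
      · rfl
      · have := hrge a ha; rw [(pvRank_eq_zero a).mpr hq] at this; omega
    have hno1 : ∀ a ∈ x :: t, PySem.Str.isIn "audio_" (PySem.Str.lower a) = false := by
      intro a ha
      cases hq : PySem.Str.isIn "audio_" (PySem.Str.lower a)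
      · rfl
      · have := hrge a ha
        rw [(pvRank_eq_one a).mpr ⟨hno0 a ha, hq⟩] at this; omega
    have hno2 : ∀ a ∈ x :: t, PySem.Str.isIn "videonote_" (PySem.Str.lower a) = false := by
      intro a ha
      cases hq : PySem.Str.isIn "videonote_" (PySem.Str.lower a)
      · rfl
      · have := hrge a ha
        rw [(pvRank_eq_two a).mpr ⟨hno0 a ha, hno1 a ha, hq⟩] at this; omega
    rw [List.find?_eq_none.mpr (fun a ha => by simpa using hno0 a ha),
        List.find?_eq_none.mpr (fun a ha => by simpa using hno1 a ha),
        List.find?_eq_none.mpr (fun a ha => by simpa using hno2 a ha)]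
    have hcg : (x :: t).find? (fun a => pvRank a == 3) =
        (x :: t).find? (fun a => pvExtA (PySem.Str.lower a)) :=
      pvFind?_congr_mem _ _ _ (fun a ha => by
        cases hq : pvExtA (PySem.Str.lower a)
        · have h2 : pvRank a ≠ 3 := fun hc => by
            have h3 := ((pvRank_eq_three a).mp hc).2.2.2; simp_all
          simp [h2, hq]
        · have h3 : pvRank a = 3 :=
            (pvRank_eq_three a).mpr ⟨hno0 a ha, hno1 a ha, hno2 a ha, by simpa using hq⟩
          simp [h3, hq])
    rw [hcg]
    have hsome : ((x :: t).find? (fun a => pvExtA (PySem.Str.lower a))).isSome := by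
      rw [List.find?_isSome]
      exact ⟨w, hw, ((pvRank_eq_three w).mp hwr).2.2.2⟩
    obtain ⟨a0, ha0⟩ := Option.isSome_iff_exists.mp hsome
    rw [ha0]
  · -- rank 4 everywhere: every scan fails, A returns attachments[0]
    have hr4 : ∀ a ∈ x :: t, pvRank a = 4 := by
      intro a ha
      have h1 := h ▸ hle a ha
      have h2 := pvRank_le_four a
      omega
    have hall : ∀ a ∈ x :: t,
        PySem.Str.isIn "voice_" (PySem.Str.lower a) = false ∧
        PySem.Str.isIn "audio_" (PySem.Str.lower a) = false ∧
        PySem.Str.isIn "videonote_" (PySem.Str.lower a) = false ∧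
        pvExtA (PySem.Str.lower a) = false :=
      fun a ha => (pvRank_eq_four a).mp (hr4 a ha)
    rw [List.find?_eq_none.mpr (fun a ha => by simpa using (hall a ha).1),
        List.find?_eq_none.mpr (fun a ha => by simpa using (hall a ha).2.1),
        List.find?_eq_none.mpr (fun a ha => by simpa using (hall a ha).2.2.1),
        List.find?_eq_none.mpr (fun a ha => by simpa using (hall a ha).2.2.2)]
    rw [List.find?_cons, hr4 x (by simp)]
    rfl

-- ===== VERDICT (by name: the statement is the Claim_ definition above) =====
theorem pick_audio_attachment_py_spec : Claim_equal_pick_audio_attachment_py := by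
  unfold Claim_equal_pick_audio_attachment_py
  intro xs _
  unfold Spec_pick_audio_attachment_py
  cases xs with
  | nil => rfl
  | cons x t =>
    have hne : (x :: t : List String) ≠ [] := by simp
    have hscan : ∀ n : String, pvScanNeedle n ((x :: t).map PySem.Str.lower) 0 =
        (x :: t).findIdx? (fun a => PySem.Str.isIn n (PySem.Str.lower a)) := by
      intro n
      rw [pvScanNeedle_eq, List.findIdx?_map]
      have hc : ((fun item => PySem.Str.isIn n item) ∘ PySem.Str.lower) =
          (fun a => PySem.Str.isIn n (PySem.Str.lower a)) := rfl
      rw [hc]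
      cases h : (x :: t).findIdx? (fun a => PySem.Str.isIn n (PySem.Str.lower a)) <;> simp [h]
    unfold pick_audio_attachment_py pick_audio_attachment_py_alt
    rw [if_neg hne, if_neg hne, pvMin?_cons, ← pvFoldl_eq_find?, ← pvChain_eq]
    simp only [pvPrioLoop]
    rw [hscan "voice_", hscan "audio_", hscan "videonote_"]
    rw [pvMatch_assoc, pvMatch_assoc, pvMatch_assoc]
    have hget0 : PySem.List.pyGet? (x :: t) 0 = some x := by
      simp [PySem.List.pyGet?, PySem.List.pyIdx?]
    rw [hget0]
    rw [pvGet_findIdx, pvGet_findIdx, pvGet_findIdx]
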